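-- pv_equiv track=rewrite | github.com/ezequiasnascimento/Problemas-Com-Matrizes | Problema4.py | descodifica
-- ===== SOURCE A (Python) =====
-- import math
--
-- def descodifica(entradaCodificada):
--
--   qtdColuna=math.sqrt(len(entradaCodificada))
--   matriz=[]
--   lista=[]
--   for digito in entradaCodificada:
--     if len(lista)==qtdColuna:
--       matriz.append(lista)
--       lista=[]
--     lista.append(digito)
--   matriz.append(lista)
--   palavra=""
--   for i in range(len(matriz)):
--     for j in range(len(matriz[i])):
--       try:
--         letra=matriz[j][i]
--       except:
--         return "INVALIDO"
--       palavra+=letra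
--   return (palavra)
-- ===== SOURCE B (Python) =====
-- import math
--
-- def descodifica(entradaCodificada):
--     n = len(entradaCodificada)
--     k = math.isqrt(n)
--     if k * k != n:
--         return "INVALIDO"
--     return "".join(entradaCodificada[i + j * k] for i in range(k) for j in range(k))
-- ===== Notes on version B (the rewrite author's own statement) =====
-- stated objective: simpler
-- what changed: B replaces A's stateful matrix-building loop and try/except-driven transpose by an arithmetic perfect-square check (math.isqrt) and a direct index formula s[i + j*k], with no intermediate matrix.
import Mathlib
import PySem

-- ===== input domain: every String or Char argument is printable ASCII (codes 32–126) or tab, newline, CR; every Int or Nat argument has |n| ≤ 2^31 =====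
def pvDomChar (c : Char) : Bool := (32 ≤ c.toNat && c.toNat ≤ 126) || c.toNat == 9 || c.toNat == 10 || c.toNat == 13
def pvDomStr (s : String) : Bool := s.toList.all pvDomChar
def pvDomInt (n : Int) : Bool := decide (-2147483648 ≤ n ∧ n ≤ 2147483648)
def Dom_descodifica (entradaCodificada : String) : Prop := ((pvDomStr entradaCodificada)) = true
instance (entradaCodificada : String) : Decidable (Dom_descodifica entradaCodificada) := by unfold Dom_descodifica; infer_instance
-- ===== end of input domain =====

-- B replaces A's matrix-building loop and try/except transpose by an arithmetic
-- perfect-square check (isqrt) and a direct index formula s[i + j*k]; objective: simpler.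

-- ===== PORT A =====
-- Python: qtdColuna = math.sqrt(len(s)); the test `len(lista) == qtdColuna` is modelled
-- exactly as lista.length * lista.length == n (math.sqrt is exact at these sizes).
def pvStepA (n : Nat) (p : List (List Char) × List Char) (d : Char) :
    List (List Char) × List Char :=
  if p.2.length * p.2.length == n then (p.1 ++ [p.2], [d]) else (p.1, p.2 ++ [d])

-- one iteration of the inner `for j` loop: letra = matriz[j][i] (try/except → Except)
def pvInnerA (matriz : List (List Char)) (i : Nat)
    (acc : Except String (List Char)) (j : Nat) : Except String (List Char) :=
  match acc with
  | .error e => .error e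
  | .ok palavra =>
    match PySem.List.pyGet? matriz (Int.ofNat j) with
    | none => .error "INVALIDO"
    | some row =>
      match PySem.List.pyGet? row (Int.ofNat i) with
      | none => .error "INVALIDO"
      | some letra => .ok (palavra ++ [letra])

-- one iteration of the outer `for i` loop (len(matriz[i]) is always in range in Python)
def pvOuterA (matriz : List (List Char)) (acc : Except String (List Char)) (i : Nat) :
    Except String (List Char) :=
  (List.range (matriz.getD i []).length).foldl (pvInnerA matriz i) acc

-- A's body on the code points of the input
def pvRunA (l : List Char) : String :=
  let n := l.length
  let st := l.foldl (pvStepA n) ([], [])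
  let matriz := st.1 ++ [st.2]
  let res := (List.range matriz.length).foldl (pvOuterA matriz) (Except.ok [])
  match res with
  | .ok palavra => String.ofList palavra
  | .error e => e

def descodifica (entradaCodificada : String) : String :=
  pvRunA entradaCodificada.toList

-- ===== PORT B =====
-- B's body on the code points of the input
def pvRunB (l : List Char) : String :=
  let n := l.length
  let k := Nat.sqrt n          -- math.isqrt
  if k * k ≠ n then "INVALIDO"
  else String.ofList ((List.range k).flatMap fun i =>
         (List.range k).map fun j => l.getD (i + j * k) ' ')

def descodifica_alt (entradaCodificada : String) : String :=
  pvRunB entradaCodificada.toList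

-- ===== PRECONDITION & SPEC =====
def Spec_descodifica (entradaCodificada : String) (out : String) : Prop := out = descodifica_alt entradaCodificada
instance (entradaCodificada : String) (out : String) : Decidable (Spec_descodifica entradaCodificada out) := by unfold Spec_descodifica; infer_instance

-- ===== CLAIM (what is proved, stated in full; the proofs are below) =====
def Claim_equal_descodifica : Prop := ∀ (entradaCodificada : String), Dom_descodifica entradaCodificada → Spec_descodifica entradaCodificada (descodifica entradaCodificada)

-- ===== LEMMAS AND PROOFS =====

-- the m consecutive rows of width k
def chunksOf (k : Nat) : Nat → List Char → List (List Char)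
  | 0, _ => []
  | m + 1, l => l.take k :: chunksOf k m (l.drop k)

-- while the length test never fires, pvStepA just appends to lista
theorem foldStep_fill (n : Nat) :
    ∀ (c : List Char) (M : List (List Char)) (L : List Char),
      (∀ t, t < c.length → (L.length + t) * (L.length + t) ≠ n) →
      List.foldl (pvStepA n) (M, L) c = (M, L ++ c) := by
  intro c
  induction c with
  | nil => intro M L _; simp
  | cons d c ih =>
    intro M L h
    have h0 : L.length * L.length ≠ n := by
      have := h 0 (by simp); simpa using this
    simp only [List.foldl_cons, pvStepA, beq_iff_eq, h0, ite_false]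
    rw [ih (M := M) (L := L ++ [d])]
    · simp
    · intro t ht
      have := h (t + 1) (by simpa using Nat.succ_lt_succ ht)
      simpa [Nat.add_comm, Nat.add_assoc, Nat.add_left_comm] using this

-- starting from a full row, the loop emits m further rows of width k' + 1
theorem foldStep_chunks (k' : Nat) :
    ∀ (m : Nat) (l : List Char) (M : List (List Char)) (L : List Char),
      L.length = k' + 1 → l.length = m * (k' + 1) →
      (List.foldl (pvStepA ((k' + 1) * (k' + 1))) (M, L) l).1
          ++ [(List.foldl (pvStepA ((k' + 1) * (k' + 1))) (M, L) l).2]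
        = M ++ L :: chunksOf (k' + 1) m l := by
  intro m
  induction m with
  | zero =>
    intro l M L hL hl
    have : l = [] := List.eq_nil_of_length_eq_zero (by simpa using hl)
    simp [this, chunksOf]
  | succ m ih =>
    intro l M L hL hl
    obtain ⟨d, l', rfl⟩ : ∃ d l', l = d :: l' := by
      cases l with
      | nil => exfalso; simp [Nat.succ_mul] at hl
      | cons d l' => exact ⟨d, l', rfl⟩
    have hl' : l'.length = m * (k' + 1) + k' := by
      simp [Nat.succ_mul] at hl ⊢; omega
    have hcond : (L.length * L.length == (k' + 1) * (k' + 1)) = true := by simp [hL]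
    simp only [List.foldl_cons, pvStepA, hcond, ite_true]
    conv_lhs => rw [show l' = l'.take k' ++ l'.drop k' from (List.take_append_drop _ _).symm]
    rw [List.foldl_append]
    rw [foldStep_fill ((k' + 1) * (k' + 1)) (l'.take k') (M ++ [L]) [d]
        (by
          intro t ht habs
          have htk : t < k' := lt_of_lt_of_le ht (List.length_take_le _ _)
          have h1 : 1 + t = k' + 1 := Nat.mul_self_inj.mp (by simpa using habs)
          omega)]
    simp only [List.singleton_append]
    have hlen2 : (d :: l'.take k').length = k' + 1 := by simp; omega
    have hdrop : (l'.drop k').length = m * (k' + 1) := by simp [hl']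
    rw [ih (l'.drop k') (M ++ [L]) (d :: l'.take k') hlen2 hdrop]
    simp [chunksOf]

theorem length_chunksOf (k : Nat) : ∀ m l, (chunksOf k m l).length = m := by
  intro m
  induction m with
  | zero => intro l; simp [chunksOf]
  | succ m ih => intro l; simp [chunksOf, ih]

theorem getD_chunksOf (k : Nat) :
    ∀ (m j : Nat) (l : List Char), j < m →
      (chunksOf k m l).getD j [] = (l.drop (j * k)).take k := by
  intro m
  induction m with
  | zero => intro j l h; omega
  | succ m ih =>
    intro j l h
    cases j with
    | zero => simp [chunksOf]
    | succ j =>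
      simp only [chunksOf, List.getD_cons_succ]
      rw [ih j (l.drop k) (by omega)]
      rw [List.drop_drop]
      ring_nf

-- an error accumulator is absorbing for the inner loop
theorem innerA_error (matriz : List (List Char)) (i : Nat) (e : String) :
    ∀ js : List Nat, List.foldl (pvInnerA matriz i) (.error e) js = .error e := by
  intro js
  induction js with
  | nil => rfl
  | cons j js ih => simpa [pvInnerA] using ih

-- the inner loop over a full square matrix collects column i
theorem innerA_ok (l : List Char) (k : Nat) (hl : l.length = k * k) (i : Nat) (hi : i < k) :
    ∀ (m : Nat), m ≤ k → ∀ (p : List Char),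
      List.foldl (pvInnerA (chunksOf k k l) i) (.ok p) (List.range m)
        = .ok (p ++ (List.range m).map fun j => l.getD (j * k + i) ' ') := by
  intro m
  induction m with
  | zero => intro _ p; simp
  | succ m ih =>
    intro hm p
    rw [List.range_succ, List.foldl_append, ih (by omega) p]
    have hmk : m * k + k ≤ k * k := by
      have := Nat.mul_le_mul_right k (show m + 1 ≤ k by omega)
      simpa [Nat.succ_mul] using this
    have hrow : PySem.List.pyGet? (chunksOf k k l) (Int.ofNat m)
        = some ((l.drop (m * k)).take k) := by
      have hmem : m < (chunksOf k k l).length := by rw [length_chunksOf]; omega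
      have hgd := getD_chunksOf k k m l (by omega)
      rw [List.getD_eq_getElem?_getD, List.getElem?_eq_getElem hmem] at hgd
      simp only [Option.getD_some] at hgd
      simp [PySem.List.pyGet?_natCast, List.getElem?_eq_getElem hmem, hgd]
    have hrowlen : ((l.drop (m * k)).take k).length = k := by
      simp [hl]; omega
    have hchar : PySem.List.pyGet? ((l.drop (m * k)).take k) (Int.ofNat i)
        = some (l.getD (m * k + i) ' ') := by
      have hi2 : i < ((l.drop (m * k)).take k).length := by omega
      have hidx : m * k + i < l.length := by rw [hl]; omega
      simp [PySem.List.pyGet?_natCast, List.getElem?_eq_getElem hi2,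
        List.getElem_take, List.getElem_drop, List.getD_eq_getElem?_getD,
        List.getElem?_eq_getElem hidx]
    simp only [List.foldl_cons, List.foldl_nil, pvInnerA, hrow, hchar]
    simp

-- the outer loop over a full square matrix collects the transpose
theorem outerA_ok (l : List Char) (k : Nat) (hl : l.length = k * k) :
    ∀ (m : Nat), m ≤ k →
      List.foldl (pvOuterA (chunksOf k k l)) (.ok []) (List.range m)
        = .ok ((List.range m).flatMap fun i =>
            (List.range k).map fun j => l.getD (j * k + i) ' ') := by
  intro m
  induction m with
  | zero => simp
  | succ m ih =>
    intro hm
    rw [List.range_succ, List.foldl_append, ih (by omega)]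
    simp only [List.foldl_cons, List.foldl_nil, pvOuterA]
    have hmk : m * k + k ≤ k * k := by
      have := Nat.mul_le_mul_right k (show m + 1 ≤ k by omega)
      simpa [Nat.succ_mul] using this
    have hrowlen : ((chunksOf k k l).getD m []).length = k := by
      rw [getD_chunksOf k k m l (by omega)]
      simp [hl]; omega
    rw [hrowlen, innerA_ok l k hl m (by omega) k (le_refl k)]
    simp

-- A on input of square length (k'+1)² reads out the transpose of the row matrix
theorem runA_square (l : List Char) (k' : Nat) (hl : l.length = (k' + 1) * (k' + 1)) :
    pvRunA l = String.ofList ((List.range (k' + 1)).flatMap fun i =>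
      (List.range (k' + 1)).map fun j => l.getD (j * (k' + 1) + i) ' ') := by
  have hk : 0 < k' + 1 := Nat.succ_pos k'
  have htlen : (l.take (k' + 1)).length = k' + 1 := by
    rw [List.length_take, hl]
    exact Nat.min_eq_left (Nat.le_mul_of_pos_left _ (Nat.succ_pos k'))
  have hdlen : (l.drop (k' + 1)).length = k' * (k' + 1) := by
    simp [hl, Nat.succ_mul]
  have hfillpart : List.foldl (pvStepA ((k' + 1) * (k' + 1))) ([], []) (l.take (k' + 1))
      = ([], l.take (k' + 1)) := by
    have := foldStep_fill ((k' + 1) * (k' + 1)) (l.take (k' + 1)) [] []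
        (by
          intro t ht habs
          have htk : t < k' + 1 := lt_of_lt_of_le ht (List.length_take_le _ _)
          have h1 : 0 + t = k' + 1 := Nat.mul_self_inj.mp (by simpa using habs)
          omega)
    simpa using this
  have hmatriz :
      (List.foldl (pvStepA ((k' + 1) * (k' + 1))) ([], []) l).1
        ++ [(List.foldl (pvStepA ((k' + 1) * (k' + 1))) ([], []) l).2]
      = chunksOf (k' + 1) (k' + 1) l := by
    conv_lhs => rw [show l = l.take (k' + 1) ++ l.drop (k' + 1) from (List.take_append_drop _ _).symm]
    rw [List.foldl_append, hfillpart]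
    rw [foldStep_chunks k' k' (l.drop (k' + 1)) [] (l.take (k' + 1)) htlen hdlen]
    simp [chunksOf]
  unfold pvRunA
  simp only [hl, hmatriz]
  rw [length_chunksOf]
  rw [outerA_ok l (k' + 1) hl (k' + 1) (le_refl _)]

-- A on a string of non-square length ≥ 2 returns "INVALIDO"
theorem runA_nonsquare (l : List Char)
    (hns : ∀ j : Nat, j * j ≠ l.length) (h2 : 2 ≤ l.length) :
    pvRunA l = "INVALIDO" := by
  unfold pvRunA
  have hfold : List.foldl (pvStepA l.length) ([], []) l = ([], [] ++ l) := by
    apply foldStep_fill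
    intro t _ habs
    exact hns t (by simpa using habs)
  simp only [hfold, List.nil_append]
  obtain ⟨a, b, rest, rfl⟩ : ∃ a b rest, l = a :: b :: rest := by
    cases l with
    | nil => simp at h2
    | cons a tl =>
      cases tl with
      | nil => simp at h2
      | cons b rest => exact ⟨a, b, rest, rfl⟩
  simp only [List.length_cons, List.length_nil]
  rw [show List.range (0 + 1) = [0] from rfl]
  simp only [List.foldl_cons, List.foldl_nil, pvOuterA, List.getD_cons_zero]
  have hr : List.range (a :: b :: rest).length
      = 0 :: 1 :: (List.range rest.length).map (fun t => 2 + t) := by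
    rw [show (a :: b :: rest).length = 2 + rest.length by simp [List.length_cons]; omega,
      List.range_add]
    rfl
  rw [show (a :: b :: rest).length = (b :: rest).length + 1 by simp] at hr ⊢
  rw [hr]
  simp only [List.foldl_cons]
  have s1 : pvInnerA [a :: b :: rest] 0 (.ok []) 0 = .ok [a] := by
    simp [pvInnerA, PySem.List.pyGet?, PySem.List.pyIdx?,
      show (0 : Int) ≤ (rest.length : Int) + 1 from by positivity]
  have s2 : pvInnerA [a :: b :: rest] 0 (.ok [a]) 1 = .error "INVALIDO" := by
    simp [pvInnerA, PySem.List.pyGet?, PySem.List.pyIdx?]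
  rw [s1, s2, innerA_error]

theorem sq_ne_of_nonsquare (n : Nat) (h : Nat.sqrt n * Nat.sqrt n ≠ n) :
    ∀ j : Nat, j * j ≠ n := by
  intro j habs
  apply h
  rw [← habs, Nat.sqrt_eq]

-- ===== VERDICT (by name: the statement is the Claim_ definition above) =====
theorem descodifica_spec : Claim_equal_descodifica := by
  intro s _
  unfold Spec_descodifica descodifica descodifica_alt
  by_cases hsq : Nat.sqrt s.toList.length * Nat.sqrt s.toList.length = s.toList.length
  · -- perfect square length
    cases hk0 : Nat.sqrt s.toList.length with
    | zero =>
      have hnil : s.toList = [] := by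
        have : s.toList.length = 0 := by rw [← hsq, hk0]
        exact List.eq_nil_of_length_eq_zero this
      rw [hnil]
      decide
    | succ k' =>
      have hl : s.toList.length = (k' + 1) * (k' + 1) := by rw [← hsq, hk0]
      rw [runA_square s.toList k' hl]
      unfold pvRunB
      simp only [hl, Nat.sqrt_eq]
      rw [if_neg (by simp)]
      congr 1
      apply List.flatMap_congr
      intro i _
      apply List.map_congr_left
      intro j _
      rw [Nat.add_comm]
  · -- not a perfect square
    have hns : ∀ j : Nat, j * j ≠ s.toList.length := sq_ne_of_nonsquare _ hsq
    have h2 : 2 ≤ s.toList.length := by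
      have h0 : (0 : Nat) * 0 ≠ s.toList.length := hns 0
      have h1 : (1 : Nat) * 1 ≠ s.toList.length := hns 1
      omega
    rw [runA_nonsquare s.toList hns h2]
    unfold pvRunB
    rw [if_pos (by simpa using hsq)]
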